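-- pv_equiv track=rewrite | github.com/lbhsos/AlgoStudy | python/bfs/bfs_12761.py | bfs
-- ===== SOURCE A (Python) =====
-- from queue import Queue
--
-- def bfs(A, B, source, destination):
--     visited = [False] * 100001
--     q = Queue()
--     q.put(source)
--     visited[source] = True
--
--     dummy = -999999
--     q.put(dummy)
--
--     level = 0
--
--     while not q.empty():
--         next = q.get()
--
--         if next == dummy:
--             level += 1
--             q.put(dummy)
--             continue
--
--         if next == destination:
--             return level
--
--         navers = [next+1,next-1,next+A,next+B,next-A,next-B,next*A,next*B]
--         for naver in navers:
--             if naver <= 100000 and naver >= 0 :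
--                 if not visited[naver]:
--                     q.put(naver)
--                     visited[naver] = True
-- ===== SOURCE B (Python) =====
-- def preds(A, B, v):
--     # exact predecessor set of v in the transform graph: u -> u+-1, u+-A, u+-B, u*A, u*B
--     ps = [v - 1, v + 1, v - A, v - B, v + A, v + B]
--     for M in (A, B):
--         if M == 0:
--             if v == 0:
--                 ps.extend(range(100001))
--         elif v % M == 0:
--             ps.append(v // M)
--     return ps
--
-- def bfs(A, B, source, destination):
--     # Reverse BFS: search backwards from the destination over predecessor edges
--     # (inverting the multiplication edges by exact division); the distance in the
--     # reversed graph equals the forward BFS distance.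
--     visited = [False] * 100001
--     visited[destination] = True
--     frontier = [destination]
--     level = 0
--     while True:
--         if source in frontier:
--             return level
--         nxt = []
--         for v in frontier:
--             for p in preds(A, B, v):
--                 if p <= 100000 and p >= 0:
--                     if not visited[p]:
--                         visited[p] = True
--                         nxt.append(p)
--         frontier = nxt
--         level += 1
-- ===== Notes on version B (the rewrite author's own statement) =====
-- stated objective: alternative
-- what changed: Searches backwards from the destination over the inverse graph: predecessor edges obtained by inverting the eight moves (multiplication edges become exact-division tests v%A==0 -> v//A, with the all-predecessors case for v==0 when A==0), instead of A's forward search from the source with a dummy-sentinel queue.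
-- outside the precondition, e.g. on bfs(200, 3, -5, 7): A returns 6, B does not finish within the time limit; on bfs(2, 3, -5, -5): A returns 0, B returns 0
import Mathlib
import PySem

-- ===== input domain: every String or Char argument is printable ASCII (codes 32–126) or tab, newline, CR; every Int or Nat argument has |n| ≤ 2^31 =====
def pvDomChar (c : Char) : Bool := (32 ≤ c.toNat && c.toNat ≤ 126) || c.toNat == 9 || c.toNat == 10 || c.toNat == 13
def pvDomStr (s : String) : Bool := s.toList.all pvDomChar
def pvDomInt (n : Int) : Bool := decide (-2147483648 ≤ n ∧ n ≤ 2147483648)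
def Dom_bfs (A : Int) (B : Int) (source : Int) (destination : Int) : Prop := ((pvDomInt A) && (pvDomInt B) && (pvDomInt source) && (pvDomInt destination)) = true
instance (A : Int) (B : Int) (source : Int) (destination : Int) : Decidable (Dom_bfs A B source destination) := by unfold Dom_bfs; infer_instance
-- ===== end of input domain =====

-- B searches BACKWARDS from the destination over predecessor edges (multiplication
-- edges inverted by exact-division tests) instead of A's forward sentinel-queue BFS
-- from the source; same return value (objective: alternative algorithm).

-- ===== PORT A =====
-- the eight neighbour candidates, in Python's order
def navA (A B n : Int) : List Int := [n+1, n-1, n+A, n+B, n-A, n-B, n*A, n*B]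

-- the inner neighbour loop shared by both ports: push unvisited in-range candidates
-- (A: `for naver in navers` onto the queue; B: `for p in preds(...)` onto nxt)
def stepA : List Int → List Int → Array Bool → List Int × Array Bool
  | [], q, v => (q, v)
  | n :: ns, q, v =>
    if n ≤ 100000 ∧ 0 ≤ n then
      if v.getD n.toNat false = false then
        stepA ns (q ++ [n]) (v.setIfInBounds n.toNat true)
      else stepA ns q v
    else stepA ns q v

-- the `while not q.empty()` loop; fuel-exhaustion and empty-queue return -1,
-- both unreachable under Pre_bfs (Python diverges / returns None only outside it)
def runA (A B destination : Int) : Nat → List Int → Array Bool → Int → Int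
  | 0, _, _, _ => -1
  | _+1, [], _, _ => -1
  | fuel+1, next :: rest, v, level =>
    if next = -999999 then runA A B destination fuel (rest ++ [-999999]) v (level+1)
    else if next = destination then level
    else
      let p := stepA (navA A B next) rest v
      runA A B destination fuel p.1 p.2 level

def bfs (A : Int) (B : Int) (source : Int) (destination : Int) : Int :=
  runA A B destination (3 * 9 ^ 100001) [source, -999999]
    ((Array.replicate 100001 false).setIfInBounds source.toNat true) 0

-- ===== PORT B =====
-- predecessors of v through multiplication by M (exact division; all of 0..100000 when M=0, v=0)
def mulpredsB (M v : Int) : List Int :=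
  if M = 0 then (if v = 0 then PySem.List.pyRange 0 100001 1 else [])
  else if PySem.Int.mod v M = 0 then [PySem.Int.floordiv v M] else []

-- B's preds(A, B, v): the exact predecessor candidates of v
def predsB (A B v : Int) : List Int :=
  [v-1, v+1, v-A, v-B, v+A, v+B] ++ mulpredsB A v ++ mulpredsB B v

-- `for v in frontier` loop building the next frontier from the nav function
def expandB (nav : Int → List Int) : List Int → List Int → Array Bool → List Int × Array Bool
  | [], nxt, v => (nxt, v)
  | c :: cs, nxt, v =>
    let p := stepA (nav c) nxt v
    expandB nav cs p.1 p.2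

-- the `while True` loop; fuel 100001 levels always suffices under Pre_bfs
def runB (nav : Int → List Int) (target : Int) : Nat → List Int → Array Bool → Int → Int
  | 0, _, _, _ => -1
  | fuel+1, frontier, v, level =>
    if frontier.contains target then level
    else
      let p := expandB nav frontier [] v
      runB nav target fuel p.1 p.2 (level+1)

def bfs_alt (A : Int) (B : Int) (source : Int) (destination : Int) : Int :=
  runB (predsB A B) source 100001 [destination]
    ((Array.replicate 100001 false).setIfInBounds destination.toNat true) 0

-- ===== PRECONDITION & SPEC =====
-- Pre_ excludes out-of-range arguments: for source outside -100001..100000 A raises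
-- IndexError; for destination outside 0..100000 (other than destination = source) A
-- loops forever; negative in-range source relies on Python's negative-index
-- wraparound marking an unrelated cell visited, an accident of A's implementation.
def Pre_bfs (A : Int) (B : Int) (source : Int) (destination : Int) : Prop :=
  0 ≤ source ∧ source ≤ 100000 ∧ 0 ≤ destination ∧ destination ≤ 100000
instance (A : Int) (B : Int) (source : Int) (destination : Int) : Decidable (Pre_bfs A B source destination) := by unfold Pre_bfs; infer_instance

def pvWitness_bfs : Int × Int × Int × Int := (2, 3, 5, 17)

def Spec_bfs (A : Int) (B : Int) (source : Int) (destination : Int) (out : Int) : Prop := out = bfs_alt A B source destination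
instance (A : Int) (B : Int) (source : Int) (destination : Int) (out : Int) : Decidable (Spec_bfs A B source destination out) := by unfold Spec_bfs; infer_instance

-- ===== CLAIM (what is proved, stated in full; the proofs are below) =====
def Claim_equal_bfs : Prop := ∀ (A : Int) (B : Int) (source : Int) (destination : Int), Dom_bfs A B source destination → Pre_bfs A B source destination → Spec_bfs A B source destination (bfs A B source destination)

-- ===== LEMMAS AND PROOFS =====

-- node is inside the board 0..100000
def InR (m : Int) : Prop := 0 ≤ m ∧ m ≤ 100000

-- node m is marked visited in v
def Vis (v : Array Bool) (m : Int) : Prop := v.getD m.toNat false = true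

lemma getD_set (a : Array Bool) (i j : Nat) :
    (a.setIfInBounds i true).getD j false =
      if i = j ∧ j < a.size then true else a.getD j false := by
  by_cases hij : i = j
  · subst hij
    by_cases hi : i < a.size
    · simp [Array.getD_eq_getD_getElem?, Array.getElem?_setIfInBounds, hi]
    · have hno : a.setIfInBounds i true = a := by
        simp [Array.setIfInBounds, hi]
      simp [hno, hi]
  · simp only [Array.getD_eq_getD_getElem?, Array.getElem?_setIfInBounds, if_neg hij]
    simp [hij]

lemma getD_repl (n j : Nat) : (Array.replicate n false).getD j false = false := by
  simp [Array.getD_eq_getD_getElem?, Array.getElem?_replicate]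
  split <;> simp

lemma vis_set_mono (v : Array Bool) (i : Nat) (x : Int) (h : Vis v x) :
    Vis (v.setIfInBounds i true) x := by
  unfold Vis at h ⊢
  rw [getD_set]
  split
  · rfl
  · exact h

-- stepA on a queue with the dummy inside is stepA on its tail segment
lemma step_rel (q1 : List Int) : ∀ (ns acc : List Int) (v : Array Bool),
    stepA ns (q1 ++ -999999 :: acc) v =
      (q1 ++ -999999 :: (stepA ns acc v).1, (stepA ns acc v).2) := by
  intro ns
  induction ns with
  | nil => intro acc v; simp [stepA]
  | cons n ns ih =>
    intro acc v
    simp only [stepA]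
    split
    · split
      · have h : (q1 ++ -999999 :: acc) ++ [n] = q1 ++ -999999 :: (acc ++ [n]) := by
          simp
        rw [h, ih]
      · exact ih acc v
    · exact ih acc v

lemma stepA_size : ∀ (ns acc : List Int) (v : Array Bool),
    (stepA ns acc v).2.size = v.size := by
  intro ns
  induction ns with
  | nil => intro acc v; simp [stepA]
  | cons n ns ih =>
    intro acc v
    simp only [stepA]
    split
    · split
      · rw [ih]; simp
      · exact ih acc v
    · exact ih acc v

lemma stepA_mono : ∀ (ns acc : List Int) (v : Array Bool) (m : Int),
    Vis v m → Vis (stepA ns acc v).2 m := by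
  intro ns
  induction ns with
  | nil => intro acc v m h; simpa [stepA] using h
  | cons n ns ih =>
    intro acc v m h
    simp only [stepA]
    split
    · split
      · exact ih _ _ m (vis_set_mono v _ m h)
      · exact ih acc v m h
    · exact ih acc v m h

lemma stepA_accmono : ∀ (ns acc : List Int) (v : Array Bool) (x : Int),
    x ∈ acc → x ∈ (stepA ns acc v).1 := by
  intro ns
  induction ns with
  | nil => intro acc v x h; simpa [stepA] using h
  | cons n ns ih =>
    intro acc v x h
    simp only [stepA]
    split
    · split
      · exact ih _ _ x (by simp [h])
      · exact ih acc v x h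
    · exact ih acc v x h

lemma stepA_new : ∀ (ns acc : List Int) (v : Array Bool), v.size = 100001 →
    ∀ x ∈ (stepA ns acc v).1, x ∈ acc ∨ (InR x ∧ Vis (stepA ns acc v).2 x) := by
  intro ns
  induction ns with
  | nil => intro acc v _ x hx; exact Or.inl (by simpa [stepA] using hx)
  | cons n ns ih =>
    intro acc v hv x hx
    simp only [stepA] at hx ⊢
    by_cases hcond : n ≤ 100000 ∧ 0 ≤ n
    · rw [if_pos hcond] at hx ⊢
      by_cases hunv : v.getD n.toNat false = false
      · rw [if_pos hunv] at hx ⊢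
        rcases ih _ _ (by simp [stepA_size, hv]) x hx with hacc | hgood
        · rcases List.mem_append.mp hacc with h | h
          · exact Or.inl h
          · right
            have hxn : x = n := by simpa using h
            subst hxn
            refine ⟨⟨hcond.2, hcond.1⟩, ?_⟩
            apply stepA_mono
            unfold Vis
            rw [getD_set]
            have : x.toNat < v.size := by omega
            simp [this]
        · exact Or.inr hgood
      · rw [if_neg hunv] at hx ⊢; exact ih _ _ hv x hx
    · rw [if_neg hcond] at hx ⊢; exact ih _ _ hv x hx

lemma stepA_cover : ∀ (ns acc : List Int) (v : Array Bool), v.size = 100001 →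
    ∀ n ∈ ns, InR n → Vis (stepA ns acc v).2 n := by
  intro ns
  induction ns with
  | nil => intro acc v _ n hn; simp at hn
  | cons m ns ih =>
    intro acc v hv n hn hnR
    rcases List.mem_cons.mp hn with rfl | hn'
    · simp only [stepA]
      have hcond : n ≤ 100000 ∧ 0 ≤ n := ⟨hnR.2, hnR.1⟩
      rw [if_pos hcond]
      by_cases hu : v.getD n.toNat false = false
      · rw [if_pos hu]
        apply stepA_mono
        unfold Vis
        rw [getD_set]
        have : n.toNat < v.size := by omega
        simp [this]
      · rw [if_neg hu]
        apply stepA_mono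
        unfold Vis
        revert hu
        cases v.getD n.toNat false <;> simp
    · simp only [stepA]
      split
      · split
        · exact ih _ _ (by simp [stepA_size, hv]) n hn' hnR
        · exact ih _ _ hv n hn' hnR
      · exact ih _ _ hv n hn' hnR

lemma stepA_vis_src : ∀ (ns acc : List Int) (v : Array Bool) (x : Int), InR x →
    Vis (stepA ns acc v).2 x → Vis v x ∨ x ∈ (stepA ns acc v).1 := by
  intro ns
  induction ns with
  | nil => intro acc v x _ h; exact Or.inl (by simpa [stepA] using h)
  | cons n ns ih =>
    intro acc v x hxR h
    simp only [stepA] at h ⊢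
    by_cases hcond : n ≤ 100000 ∧ 0 ≤ n
    · rw [if_pos hcond] at h ⊢
      by_cases hunv : v.getD n.toNat false = false
      · rw [if_pos hunv] at h ⊢
        rcases ih _ _ x hxR h with hv' | hmem
        · unfold Vis at hv'
          rw [getD_set] at hv'
          split at hv'
          · rename_i heq
            have hxn : x = n := by
              rcases hxR with ⟨hx0, hx1⟩
              rcases hcond with ⟨hn1, hn0⟩
              omega
            subst hxn
            exact Or.inr (stepA_accmono _ _ _ x (by simp))
          · exact Or.inl hv'
        · exact Or.inr hmem
      · rw [if_neg hunv] at h ⊢; exact ih _ _ x hxR h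
    · rw [if_neg hcond] at h ⊢; exact ih _ _ x hxR h

lemma stepA_len : ∀ (ns acc : List Int) (v : Array Bool),
    (stepA ns acc v).1.length ≤ acc.length + ns.length := by
  intro ns
  induction ns with
  | nil => intro acc v; simp [stepA]
  | cons n ns ih =>
    intro acc v
    simp only [stepA, List.length_cons]
    split
    · split
      · have := ih (acc ++ [n]) (v.setIfInBounds n.toNat true)
        simp only [List.length_append, List.length_cons, List.length_nil] at this
        omega
      · have := ih acc v; omega
    · have := ih acc v; omega

lemma stepA_push_src : ∀ (ns acc : List Int) (v : Array Bool) (x : Int),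
    x ∈ (stepA ns acc v).1 → x ∈ acc ∨ (x ∈ ns ∧ InR x) := by
  intro ns
  induction ns with
  | nil => intro acc v x hx; exact Or.inl (by simpa [stepA] using hx)
  | cons n ns ih =>
    intro acc v x hx
    simp only [stepA] at hx
    by_cases hcond : n ≤ 100000 ∧ 0 ≤ n
    · rw [if_pos hcond] at hx
      by_cases hunv : v.getD n.toNat false = false
      · rw [if_pos hunv] at hx
        rcases ih _ _ x hx with hacc | ⟨hns, hR⟩
        · rcases List.mem_append.mp hacc with h | h
          · exact Or.inl h
          · have hxn : x = n := by simpa using h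
            subst hxn
            exact Or.inr ⟨by simp, ⟨hcond.2, hcond.1⟩⟩
        · exact Or.inr ⟨by simp [hns], hR⟩
      · rw [if_neg hunv] at hx
        rcases ih _ _ x hx with h | ⟨hns, hR⟩
        · exact Or.inl h
        · exact Or.inr ⟨by simp [hns], hR⟩
    · rw [if_neg hcond] at hx
      rcases ih _ _ x hx with h | ⟨hns, hR⟩
      · exact Or.inl h
      · exact Or.inr ⟨by simp [hns], hR⟩

lemma stepA_nopush : ∀ (ns acc : List Int) (v : Array Bool) (x : Int),
    Vis v x → x ∈ (stepA ns acc v).1 → x ∈ acc := by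
  intro ns
  induction ns with
  | nil => intro acc v x _ hx; simpa [stepA] using hx
  | cons n ns ih =>
    intro acc v x hvx hx
    simp only [stepA] at hx
    by_cases hcond : n ≤ 100000 ∧ 0 ≤ n
    · rw [if_pos hcond] at hx
      by_cases hunv : v.getD n.toNat false = false
      · rw [if_pos hunv] at hx
        have := ih _ _ x (vis_set_mono v _ x hvx) hx
        rcases List.mem_append.mp this with h | h
        · exact h
        · have hxn : x = n := by simpa using h
          subst hxn
          unfold Vis at hvx
          rw [hvx] at hunv
          simp at hunv
      · rw [if_neg hunv] at hx; exact ih _ _ x hvx hx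
    · rw [if_neg hcond] at hx; exact ih _ _ x hvx hx

lemma stepA_mem_or_vis : ∀ (ns acc : List Int) (v : Array Bool) (x : Int),
    x ∈ ns → InR x → x ∈ (stepA ns acc v).1 ∨ Vis v x := by
  intro ns
  induction ns with
  | nil => intro acc v x hx; simp at hx
  | cons n ns ih =>
    intro acc v x hx hxR
    simp only [stepA]
    rcases List.mem_cons.mp hx with rfl | hx'
    · have hcond : x ≤ 100000 ∧ 0 ≤ x := ⟨hxR.2, hxR.1⟩
      rw [if_pos hcond]
      by_cases hunv : v.getD x.toNat false = false
      · rw [if_pos hunv]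
        exact Or.inl (stepA_accmono _ _ _ x (by simp))
      · rw [if_neg hunv]
        right
        unfold Vis
        revert hunv
        cases v.getD x.toNat false <;> simp
    · by_cases hcond : n ≤ 100000 ∧ 0 ≤ n
      · rw [if_pos hcond]
        by_cases hunv : v.getD n.toNat false = false
        · rw [if_pos hunv]
          rcases ih (acc ++ [n]) (v.setIfInBounds n.toNat true) x hx' hxR with h | h
          · exact Or.inl h
          · -- Vis (v.set n) x → x = n (then pushed) ∨ Vis v x
            unfold Vis at h
            rw [getD_set] at h
            split at h
            · rename_i heq
              have hxn : x = n := by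
                rcases hxR with ⟨h0, h1⟩
                rcases hcond with ⟨h2, h3⟩
                omega
              subst hxn
              exact Or.inl (stepA_accmono _ _ _ x (by simp))
            · exact Or.inr h
        · rw [if_neg hunv]; exact ih acc v x hx' hxR
      · rw [if_neg hcond]; exact ih acc v x hx' hxR

lemma expandB_size (nav : Int → List Int) : ∀ (F acc : List Int) (v : Array Bool),
    (expandB nav F acc v).2.size = v.size := by
  intro F
  induction F with
  | nil => intro acc v; simp [expandB]
  | cons c cs ih =>
    intro acc v
    simp only [expandB]
    rw [ih]
    exact stepA_size _ _ _

lemma expandB_mono (nav : Int → List Int) : ∀ (F acc : List Int) (v : Array Bool) (m : Int),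
    Vis v m → Vis (expandB nav F acc v).2 m := by
  intro F
  induction F with
  | nil => intro acc v m h; simpa [expandB] using h
  | cons c cs ih =>
    intro acc v m h
    simp only [expandB]
    exact ih _ _ m (stepA_mono _ _ _ m h)

lemma expandB_new (nav : Int → List Int) : ∀ (F acc : List Int) (v : Array Bool), v.size = 100001 →
    ∀ x ∈ (expandB nav F acc v).1, x ∈ acc ∨ (InR x ∧ Vis (expandB nav F acc v).2 x) := by
  intro F
  induction F with
  | nil => intro acc v _ x hx; exact Or.inl (by simpa [expandB] using hx)
  | cons c cs ih =>
    intro acc v hv x hx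
    simp only [expandB] at hx ⊢
    have hv' : (stepA (nav c) acc v).2.size = 100001 := by
      rw [stepA_size]; exact hv
    rcases ih _ _ hv' x hx with hacc | hgood
    · rcases stepA_new _ _ _ hv x hacc with h | ⟨h1, h2⟩
      · exact Or.inl h
      · exact Or.inr ⟨h1, expandB_mono nav _ _ _ x h2⟩
    · exact Or.inr hgood

lemma expandB_cover (nav : Int → List Int) : ∀ (F acc : List Int) (v : Array Bool), v.size = 100001 →
    ∀ c ∈ F, ∀ n ∈ nav c, InR n → Vis (expandB nav F acc v).2 n := by
  intro F
  induction F with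
  | nil => intro acc v _ c hc; simp at hc
  | cons c0 cs ih =>
    intro acc v hv c hc n hn hnR
    simp only [expandB]
    rcases List.mem_cons.mp hc with rfl | hc'
    · exact expandB_mono nav _ _ _ n (stepA_cover _ _ _ hv n hn hnR)
    · exact ih _ _ (by rw [stepA_size]; exact hv) c hc' n hn hnR

lemma expandB_accmono (nav : Int → List Int) : ∀ (F acc : List Int) (v : Array Bool) (x : Int),
    x ∈ acc → x ∈ (expandB nav F acc v).1 := by
  intro F
  induction F with
  | nil => intro acc v x h; simpa [expandB] using h
  | cons c cs ih =>
    intro acc v x h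
    simp only [expandB]
    exact ih _ _ x (stepA_accmono _ _ _ x h)

lemma expandB_vis_src (nav : Int → List Int) : ∀ (F acc : List Int) (v : Array Bool) (x : Int), InR x →
    Vis (expandB nav F acc v).2 x → Vis v x ∨ x ∈ (expandB nav F acc v).1 := by
  intro F
  induction F with
  | nil => intro acc v x _ h; exact Or.inl (by simpa [expandB] using h)
  | cons c cs ih =>
    intro acc v x hxR h
    simp only [expandB] at h ⊢
    rcases ih _ _ x hxR h with hv' | hmem
    · rcases stepA_vis_src _ _ _ x hxR hv' with h1 | h2
      · exact Or.inl h1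
      · exact Or.inr (expandB_accmono nav cs _ _ x h2)
    · exact Or.inr hmem

lemma expandB_len (nav : Int → List Int) (hnav : ∀ c, (nav c).length ≤ 8) :
    ∀ (F acc : List Int) (v : Array Bool),
    (expandB nav F acc v).1.length ≤ acc.length + 8 * F.length := by
  intro F
  induction F with
  | nil => intro acc v; simp [expandB]
  | cons c cs ih =>
    intro acc v
    simp only [expandB, List.length_cons]
    have h1 := ih (stepA (nav c) acc v).1 (stepA (nav c) acc v).2
    have h2 := stepA_len (nav c) acc v
    have h3 := hnav c
    omega

lemma expandB_push_src (nav : Int → List Int) : ∀ (F acc : List Int) (v : Array Bool) (x : Int),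
    x ∈ (expandB nav F acc v).1 → x ∈ acc ∨ (InR x ∧ ∃ c ∈ F, x ∈ nav c) := by
  intro F
  induction F with
  | nil => intro acc v x hx; exact Or.inl (by simpa [expandB] using hx)
  | cons c cs ih =>
    intro acc v x hx
    simp only [expandB] at hx
    rcases ih _ _ x hx with hacc | ⟨hR, c', hc', hm⟩
    · rcases stepA_push_src _ _ _ x hacc with h | ⟨hm, hR⟩
      · exact Or.inl h
      · exact Or.inr ⟨hR, c, by simp, hm⟩
    · exact Or.inr ⟨hR, c', by simp [hc'], hm⟩

lemma expandB_nopush (nav : Int → List Int) : ∀ (F acc : List Int) (v : Array Bool) (x : Int),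
    Vis v x → x ∈ (expandB nav F acc v).1 → x ∈ acc := by
  intro F
  induction F with
  | nil => intro acc v x _ hx; simpa [expandB] using hx
  | cons c cs ih =>
    intro acc v x hvx hx
    simp only [expandB] at hx
    exact stepA_nopush _ _ _ x hvx (ih _ _ x (stepA_mono _ _ _ x hvx) hx)

lemma expandB_mem_or_vis (nav : Int → List Int) : ∀ (F acc : List Int) (v : Array Bool) (c x : Int),
    c ∈ F → x ∈ nav c → InR x → x ∈ (expandB nav F acc v).1 ∨ Vis v x := by
  intro F
  induction F with
  | nil => intro acc v c x hc; simp at hc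
  | cons c0 cs ih =>
    intro acc v c x hc hm hxR
    simp only [expandB]
    rcases List.mem_cons.mp hc with rfl | hc'
    · rcases stepA_mem_or_vis (nav c) acc v x hm hxR with h | h
      · exact Or.inl (expandB_accmono nav cs _ _ x h)
      · exact Or.inr h
    · rcases ih (stepA (nav c0) acc v).1 (stepA (nav c0) acc v).2 c x hc' hm hxR with h | h
      · exact Or.inl h
      · rcases stepA_vis_src _ _ _ x hxR h with h1 | h2
        · exact Or.inr h1
        · exact Or.inl (expandB_accmono nav cs _ _ x h2)

-- membership in the next frontier, characterised (acc = [])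
lemma expand_mem_iff (nav : Int → List Int) (F : List Int) (v : Array Bool) (x : Int) :
    x ∈ (expandB nav F [] v).1 ↔ (¬ Vis v x ∧ InR x ∧ ∃ c ∈ F, x ∈ nav c) := by
  constructor
  · intro hx
    refine ⟨fun hvx => ?_, ?_⟩
    · have := expandB_nopush nav F [] v x hvx hx
      simp at this
    · rcases expandB_push_src nav F [] v x hx with h | ⟨hR, hc⟩
      · simp at h
      · exact ⟨hR, hc⟩
  · rintro ⟨hnv, hR, c, hc, hm⟩
    rcases expandB_mem_or_vis nav F [] v c x hc hm hR with h | h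
    · exact h
    · exact absurd h hnv

lemma expand_vis_iff (nav : Int → List Int) (F : List Int) (v : Array Bool)
    (hv : v.size = 100001) (x : Int) (hx : InR x) :
    Vis (expandB nav F [] v).2 x ↔ (Vis v x ∨ x ∈ (expandB nav F [] v).1) := by
  constructor
  · exact expandB_vis_src nav F [] v x hx
  · rintro (h | h)
    · exact expandB_mono nav F [] v x h
    · rcases expandB_new nav F [] v hv x h with h' | ⟨_, h2⟩
      · simp at h'
      · exact h2

-- one sweep of A's queue up to the dummy equals one level expansion of B's loop shape
lemma runA_level (A B dest : Int) : ∀ (F nxt : List Int) (v : Array Bool) (lvl : Int) (fa : Nat),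
    (∀ x ∈ F, (0:Int) ≤ x) →
    runA A B dest (F.length + 1 + fa) (F ++ -999999 :: nxt) v lvl =
      if F.contains dest then lvl
      else runA A B dest fa ((expandB (navA A B) F nxt v).1 ++ [-999999]) (expandB (navA A B) F nxt v).2 (lvl+1) := by
  intro F
  induction F with
  | nil =>
    intro nxt v lvl fa _
    have hf : ([] : List Int).length + 1 + fa = fa + 1 := by simp [Nat.add_comm]
    rw [hf]
    simp [runA, expandB]
  | cons c cs ih =>
    intro nxt v lvl fa hpos
    have hc0 : (0:Int) ≤ c := hpos c (by simp)
    have hf : (c :: cs).length + 1 + fa = (cs.length + 1 + fa) + 1 := by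
      simp [List.length_cons]; omega
    rw [hf]
    have hcd : ¬ (c = -999999) := by omega
    simp only [List.cons_append, runA, if_neg hcd]
    by_cases hdest : c = dest
    · subst hdest
      rw [if_pos rfl]
      have : (c :: cs).contains c = true := by simp
      rw [this]
      simp
    · rw [if_neg hdest]
      show runA A B dest (cs.length + 1 + fa)
        (stepA (navA A B c) (cs ++ -999999 :: nxt) v).1
        (stepA (navA A B c) (cs ++ -999999 :: nxt) v).2 lvl = _
      rw [step_rel]
      rw [ih _ _ lvl fa (fun x hx => hpos x (by simp [hx]))]
      have hcont : (c :: cs).contains dest = cs.contains dest := by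
        simp only [List.contains_cons]
        have : (dest == c) = false := by
          simp only [beq_eq_false_iff_ne, ne_eq]
          exact fun h => hdest h.symm
        rw [this]; simp
      rw [hcont]
      simp only [expandB]

-- from any visited node at distance ≤ n from dest, some frontier node is at distance ≤ n
lemma pull (dest : Int) (F : List Int) (v : Array Bool) (hd : InR dest)
    (hb : ∀ x, InR x → Vis v x → x ∉ F →
      ((InR (x+1) → Vis v (x+1)) ∧ (InR (x-1) → Vis v (x-1))))
    (hnd : ¬ Vis v dest) :
    ∀ n : Nat, ∀ m, InR m → Vis v m → (dest - m).natAbs ≤ n →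
      ∃ m₁, m₁ ∈ F ∧ (dest - m₁).natAbs ≤ n := by
  intro n
  induction n with
  | zero =>
    intro m hmR hmV habs
    have : m = dest := by omega
    subst this
    exact absurd hmV hnd
  | succ n ih =>
    intro m hmR hmV habs
    obtain ⟨hm0, hm1⟩ := hmR
    obtain ⟨hd0, hd1⟩ := hd
    by_cases hmF : m ∈ F
    · exact ⟨m, hmF, habs⟩
    · have hmd : m ≠ dest := fun h => hnd (h ▸ hmV)
      rcases hb m ⟨hm0, hm1⟩ hmV hmF with ⟨hp, hq⟩
      by_cases hlt : m < dest
      · have h1R : InR (m+1) := ⟨by omega, by omega⟩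
        obtain ⟨m₁, h₁, h₂⟩ := ih (m+1) h1R (hp h1R) (by omega)
        exact ⟨m₁, h₁, by omega⟩
      · have h1R : InR (m-1) := ⟨by omega, by omega⟩
        obtain ⟨m₁, h₁, h₂⟩ := ih (m-1) h1R (hq h1R) (by omega)
        exact ⟨m₁, h₁, by omega⟩

-- main simulation: A's queue = frontier ++ dummy, same visited array, same level
lemma main (A B dest : Int) (hd : InR dest) :
    ∀ k : Nat, ∀ (F : List Int) (v : Array Bool) (dist : Int) (fa fb : Nat),
    v.size = 100001 →
    (∀ x ∈ F, InR x ∧ Vis v x) →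
    (∀ x, InR x → Vis v x → x ∉ F →
      ((InR (x+1) → Vis v (x+1)) ∧ (InR (x-1) → Vis v (x-1)))) →
    (Vis v dest → dest ∈ F) →
    (∃ m, InR m ∧ Vis v m ∧ (dest - m).natAbs ≤ k) →
    k + 1 ≤ fb → (F.length + 2) * 9 ^ (k+1) ≤ fa →
    runA A B dest fa (F ++ [-999999]) v dist = runB (navA A B) dest fb F v dist := by
  intro k
  induction k with
  | zero =>
    intro F v dist fa fb hv ha hb hc hm hfb hfa
    obtain ⟨m, hmR, hmV, habs⟩ := hm
    have hmd : m = dest := by omega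
    subst hmd
    have hdF : m ∈ F := hc hmV
    have hcontT : F.contains m = true := by simpa using hdF
    have hpos : ∀ x ∈ F, (0:Int) ≤ x := by
      intro x hx; obtain ⟨⟨h0, _⟩, _⟩ := ha x hx; exact h0
    have hfa1 : F.length + 1 ≤ fa := by
      have h91 : (9:Nat) ^ (0+1) = 9 := by norm_num
      rw [h91] at hfa; omega
    have hfaeq : fa = F.length + 1 + (fa - F.length - 1) := by omega
    have hAc : runA A B m fa (F ++ [-999999]) v dist = dist := by
      conv_lhs => rw [hfaeq]
      rw [show F ++ [-999999] = F ++ -999999 :: ([]:List Int) from rfl]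
      rw [runA_level A B m F [] v dist _ hpos, if_pos hcontT]
    have hBc : runB (navA A B) m fb F v dist = dist := by
      cases fb with
      | zero => omega
      | succ fb' => simp only [runB]; rw [if_pos hcontT]
    rw [hAc, hBc]
  | succ k ih =>
    intro F v dist fa fb hv ha hb hc hm hfb hfa
    have hpos : ∀ x ∈ F, (0:Int) ≤ x := by
      intro x hx; obtain ⟨⟨h0, _⟩, _⟩ := ha x hx; exact h0
    by_cases hdF : dest ∈ F
    · -- destination already in the frontier: both sides return dist
      have hcontT : F.contains dest = true := by simpa using hdF
      have hfa1 : F.length + 1 ≤ fa := by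
        have h9' : (9:Nat) ≤ 9 ^ (k+1+1) := Nat.le_self_pow (by omega) 9
        have hmul := Nat.mul_le_mul (Nat.le_refl (F.length + 2)) h9'
        omega
      have hfaeq : fa = F.length + 1 + (fa - F.length - 1) := by omega
      have hAc : runA A B dest fa (F ++ [-999999]) v dist = dist := by
        conv_lhs => rw [hfaeq]
        rw [show F ++ [-999999] = F ++ -999999 :: ([]:List Int) from rfl]
        rw [runA_level A B dest F [] v dist _ hpos, if_pos hcontT]
      have hBc : runB (navA A B) dest fb F v dist = dist := by
        cases fb with
        | zero => omega
        | succ fb' => simp only [runB]; rw [if_pos hcontT]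
      rw [hAc, hBc]
    · have hcont : ¬ (F.contains dest = true) := by simpa using hdF
      have hnd : ¬ Vis v dest := fun h => hdF (hc h)
      obtain ⟨m, hmR, hmV, habs⟩ := hm
      obtain ⟨m₁, hm₁F, hm₁abs⟩ := pull dest F v hd hb hnd (k+1) m hmR hmV habs
      obtain ⟨hm10, hm11⟩ := (ha m₁ hm₁F).1
      have hm₁d : m₁ ≠ dest := fun h => hdF (h ▸ hm₁F)
      obtain ⟨hd0, hd1⟩ := hd
      have hm'spec : ∃ m', m' ∈ navA A B m₁ ∧ InR m' ∧ (dest - m').natAbs ≤ k := by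
        by_cases hlt : m₁ < dest
        · exact ⟨m₁+1, by simp [navA], ⟨by omega, by omega⟩, by omega⟩
        · exact ⟨m₁-1, by simp [navA], ⟨by omega, by omega⟩, by omega⟩
      obtain ⟨m', hm'nav, hm'R, hm'abs⟩ := hm'spec
      have hv₂ : (expandB (navA A B) F [] v).2.size = 100001 := by rw [expandB_size]; exact hv
      have ha₂ : ∀ x ∈ (expandB (navA A B) F [] v).1, InR x ∧ Vis (expandB (navA A B) F [] v).2 x := by
        intro x hx
        rcases expandB_new (navA A B) F [] v hv x hx with h | h
        · simp at h
        · exact h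
      have hb₂ : ∀ x, InR x → Vis (expandB (navA A B) F [] v).2 x → x ∉ (expandB (navA A B) F [] v).1 →
          ((InR (x+1) → Vis (expandB (navA A B) F [] v).2 (x+1)) ∧
           (InR (x-1) → Vis (expandB (navA A B) F [] v).2 (x-1))) := by
        intro x hxR hxV hxF2
        rcases expandB_vis_src (navA A B) F [] v x hxR hxV with hxV1 | hxm
        · by_cases hxF : x ∈ F
          · constructor
            · intro h1; exact expandB_cover (navA A B) F [] v hv x hxF (x+1) (by simp [navA]) h1
            · intro h1; exact expandB_cover (navA A B) F [] v hv x hxF (x-1) (by simp [navA]) h1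
          · rcases hb x hxR hxV1 hxF with ⟨hp, hq⟩
            exact ⟨fun h1 => expandB_mono (navA A B) F [] v _ (hp h1),
                   fun h1 => expandB_mono (navA A B) F [] v _ (hq h1)⟩
        · exact absurd hxm hxF2
      have hc₂ : Vis (expandB (navA A B) F [] v).2 dest → dest ∈ (expandB (navA A B) F [] v).1 := by
        intro h
        rcases expandB_vis_src (navA A B) F [] v dest ⟨hd0, hd1⟩ h with h1 | h2
        · exact absurd h1 hnd
        · exact h2
      have hm₂ : ∃ mm, InR mm ∧ Vis (expandB (navA A B) F [] v).2 mm ∧ (dest - mm).natAbs ≤ k :=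
        ⟨m', hm'R, expandB_cover (navA A B) F [] v hv m₁ hm₁F m' hm'nav hm'R, hm'abs⟩
      have h9 : 1 ≤ 9 ^ (k+1) := Nat.one_le_pow _ _ (by norm_num)
      have hL : (expandB (navA A B) F [] v).1.length ≤ 8 * F.length := by
        have := expandB_len (navA A B) (fun c => by simp [navA]) F [] v
        simpa using this
      have hfa1 : F.length + 1 ≤ fa := by
        have h9' : (9:Nat) ≤ 9 ^ (k+1+1) := Nat.le_self_pow (by omega) 9
        have hmul := Nat.mul_le_mul (Nat.le_refl (F.length + 2)) h9'
        omega
      have hfa₂ : ((expandB (navA A B) F [] v).1.length + 2) * 9 ^ (k+1) ≤ fa - F.length - 1 := by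
        have hLP : F.length ≤ F.length * 9 ^ (k+1) := Nat.le_mul_of_pos_right _ (by omega)
        have e1 : (8 * F.length + 2) * 9 ^ (k+1) = 8*(F.length * 9 ^ (k+1)) + 2*9 ^ (k+1) := by
          ring
        have e2 : (F.length + 2) * 9 ^ (k+1+1) = 9*(F.length * 9 ^ (k+1)) + 18*9 ^ (k+1) := by
          rw [pow_succ]; ring
        have hmono := Nat.mul_le_mul
          (show (expandB (navA A B) F [] v).1.length + 2 ≤ 8 * F.length + 2 by omega)
          (Nat.le_refl (9 ^ (k+1)))
        omega
      cases fb with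
      | zero => omega
      | succ fb' =>
        have hBstep : runB (navA A B) dest (fb'+1) F v dist =
            runB (navA A B) dest fb' (expandB (navA A B) F [] v).1 (expandB (navA A B) F [] v).2 (dist+1) := by
          simp only [runB]
          rw [if_neg hcont]
        have hfaeq : fa = F.length + 1 + (fa - F.length - 1) := by omega
        have hAstep : runA A B dest fa (F ++ [-999999]) v dist =
            runA A B dest (fa - F.length - 1) ((expandB (navA A B) F [] v).1 ++ [-999999])
              (expandB (navA A B) F [] v).2 (dist+1) := by
          conv_lhs => rw [hfaeq]
          rw [show F ++ [-999999] = F ++ -999999 :: ([]:List Int) from rfl]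
          rw [runA_level A B dest F [] v dist _ hpos, if_neg hcont]
        rw [hAstep, hBstep]
        exact ih (expandB (navA A B) F [] v).1 (expandB (navA A B) F [] v).2 (dist+1)
          (fa - F.length - 1) fb' hv₂ ha₂ hb₂ hc₂ hm₂ (by omega) hfa₂

-- ===== reachability, BFS correctness, edge reversal =====

-- walks of length k from s under a successor-candidate function nav (both ends in range)
def ReachG (nav : Int → List Int) (s : Int) : Nat → Int → Prop
  | 0, x => x = s
  | k+1, x => ∃ w, ReachG nav s k w ∧ (InR w ∧ InR x ∧ x ∈ nav w)

def DG (nav : Int → List Int) (s : Int) (r : Nat) (x : Int) : Prop :=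
  ∃ k ≤ r, ReachG nav s k x

def DltG (nav : Int → List Int) (s : Int) (r : Nat) (x : Int) : Prop :=
  ∃ k < r, ReachG nav s k x

lemma reachG_InR (nav : Int → List Int) (s : Int) (hs : InR s) :
    ∀ (k : Nat) (x : Int), ReachG nav s k x → InR x := by
  intro k
  induction k with
  | zero => intro x h; rw [show ReachG nav s 0 x = (x = s) from rfl] at h; exact h ▸ hs
  | succ k ih => rintro x ⟨w, _, _, hx, _⟩; exact hx

lemma dg_InR (nav : Int → List Int) (s : Int) (hs : InR s) (r : Nat) (x : Int)
    (h : DG nav s r x) : InR x := by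
  obtain ⟨k, _, hr⟩ := h
  exact reachG_InR nav s hs k x hr

lemma dg_mono (nav : Int → List Int) (s : Int) (r : Nat) (x : Int)
    (h : DG nav s r x) : DG nav s (r+1) x := by
  obtain ⟨k, hk, hr⟩ := h
  exact ⟨k, by omega, hr⟩

lemma dlt_succ (nav : Int → List Int) (s : Int) (r : Nat) (x : Int) :
    DltG nav s (r+1) x ↔ DG nav s r x := by
  constructor
  · rintro ⟨k, hk, h⟩; exact ⟨k, by omega, h⟩
  · rintro ⟨k, hk, h⟩; exact ⟨k, by omega, h⟩

-- one BFS round advances the exact-distance characterisation by one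
lemma frontier_step (nav : Int → List Int) (s : Int) (hs : InR s) (r : Nat)
    (F : List Int) (v : Array Bool) (hv : v.size = 100001)
    (hVis : ∀ x, InR x → (Vis v x ↔ DG nav s r x))
    (hF : ∀ x, x ∈ F ↔ (DG nav s r x ∧ ¬ DltG nav s r x)) :
    (∀ x, x ∈ (expandB nav F [] v).1 ↔ (DG nav s (r+1) x ∧ ¬ DG nav s r x)) ∧
    (∀ x, InR x → (Vis (expandB nav F [] v).2 x ↔ DG nav s (r+1) x)) := by
  have hfwd : ∀ x, x ∈ (expandB nav F [] v).1 → (DG nav s (r+1) x ∧ ¬ DG nav s r x) := by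
    intro x hx
    obtain ⟨hnv, hxR, c, hcF, hm⟩ := (expand_mem_iff nav F v x).mp hx
    have hnd : ¬ DG nav s r x := fun h => hnv ((hVis x hxR).mpr h)
    obtain ⟨hDc, _⟩ := (hF c).mp hcF
    have hcR : InR c := dg_InR nav s hs r c hDc
    obtain ⟨k, hk, hreach⟩ := hDc
    refine ⟨⟨k+1, by omega, ⟨c, hreach, hcR, hxR, hm⟩⟩, hnd⟩
  have hbwd : ∀ x, (DG nav s (r+1) x ∧ ¬ DG nav s r x) → x ∈ (expandB nav F [] v).1 := by
    rintro x ⟨hD, hnD⟩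
    have hxR : InR x := dg_InR nav s hs (r+1) x hD
    have hnv : ¬ Vis v x := fun h => hnD ((hVis x hxR).mp h)
    obtain ⟨k, hk, hreach⟩ := hD
    have hkr : k = r + 1 := by
      rcases Nat.lt_or_ge k (r+1) with h | h
      · exact absurd ⟨k, by omega, hreach⟩ hnD
      · omega
    subst hkr
    obtain ⟨w, hrw, hwR, _, hm⟩ := hreach
    have hwF : w ∈ F := by
      refine (hF w).mpr ⟨⟨r, le_refl r, hrw⟩, ?_⟩
      rintro ⟨k', hk', hrw'⟩
      exact hnD ⟨k'+1, by omega, ⟨w, hrw', hwR, hxR, hm⟩⟩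
    exact (expand_mem_iff nav F v x).mpr ⟨hnv, hxR, w, hwF, hm⟩
  refine ⟨fun x => ⟨hfwd x, hbwd x⟩, ?_⟩
  intro x hxR
  rw [expand_vis_iff nav F v hv x hxR]
  constructor
  · rintro (h | h)
    · exact dg_mono nav s r x ((hVis x hxR).mp h)
    · exact (hfwd x h).1
  · intro hD
    by_cases hDr : DG nav s r x
    · exact Or.inl ((hVis x hxR).mpr hDr)
    · exact Or.inr (hbwd x ⟨hD, hDr⟩)

-- the frontier-BFS loop returns the exact distance of the target
lemma runB_correct (nav : Int → List Int) (s target : Int) (hs : InR s) :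
    ∀ (j r : Nat) (F : List Int) (v : Array Bool) (fuel : Nat) (dist : Int),
    v.size = 100001 →
    (∀ x, InR x → (Vis v x ↔ DG nav s r x)) →
    (∀ x, x ∈ F ↔ (DG nav s r x ∧ ¬ DltG nav s r x)) →
    DG nav s (r + j) target → (¬ DltG nav s (r + j) target) →
    j < fuel →
    runB nav target fuel F v dist = dist + (j : Int) := by
  intro j
  induction j with
  | zero =>
    intro r F v fuel dist hv hVis hF hD hnD hfuel
    have htF : target ∈ F := (hF target).mpr ⟨by simpa using hD, by simpa using hnD⟩
    have hcont : F.contains target = true := by simpa using htF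
    cases fuel with
    | zero => omega
    | succ fuel' =>
      simp only [runB]
      rw [if_pos hcont]
      simp
  | succ j ih =>
    intro r F v fuel dist hv hVis hF hD hnD hfuel
    have htF : target ∉ F := by
      intro h
      obtain ⟨hDr, _⟩ := (hF target).mp h
      obtain ⟨k, hk, hreach⟩ := hDr
      exact hnD ⟨k, by omega, hreach⟩
    have hcont : ¬ (F.contains target = true) := by simpa using htF
    cases fuel with
    | zero => omega
    | succ fuel' =>
      simp only [runB]
      rw [if_neg hcont]
      obtain ⟨hF', hVis'⟩ := frontier_step nav s hs r F v hv hVis hF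
      have hF'' : ∀ x, x ∈ (expandB nav F [] v).1 ↔ (DG nav s (r+1) x ∧ ¬ DltG nav s (r+1) x) := by
        intro x
        rw [hF' x, dlt_succ]
      have hshift : r + (j+1) = (r+1) + j := by omega
      rw [hshift] at hD hnD
      have := ih (r+1) (expandB nav F [] v).1 (expandB nav F [] v).2 fuel' (dist+1)
        (by rw [expandB_size]; exact hv) hVis' hF'' hD hnD (by omega)
      rw [this]
      push_cast
      ring

-- minimum of a nonempty set of naturals
lemma nat_exists_min (P : Nat → Prop) : ∀ n, P n → ∃ m, P m ∧ ∀ k < m, ¬ P k := by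
  intro n
  induction n using Nat.strong_induction_on with
  | _ n ih =>
    intro hn
    by_cases h : ∃ k, k < n ∧ P k
    · obtain ⟨k, hk, hpk⟩ := h
      exact ih k hk hpk
    · exact ⟨n, hn, fun k hk hpk => h ⟨k, hk, hpk⟩⟩

-- a ±1 chain realises every pair of in-range nodes (both navA and predsB contain v+1 and v-1)
lemma reach_chain (nav : Int → List Int) (h1 : ∀ v : Int, v + 1 ∈ nav v)
    (hm1 : ∀ v : Int, v - 1 ∈ nav v) (s : Int) (hs : InR s) :
    ∀ (n : Nat) (t : Int), InR t → (t - s).natAbs = n → ReachG nav s n t := by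
  intro n
  induction n with
  | zero =>
    intro t ht h0
    have : t = s := by
      unfold InR at hs ht; omega
    rw [show ReachG nav s 0 t = (t = s) from rfl]
    exact this
  | succ n ih =>
    intro t ht hn
    obtain ⟨hs0, hs1⟩ := hs
    obtain ⟨ht0, ht1⟩ := ht
    by_cases hlt : s < t
    · have ht' : InR (t-1) := ⟨by omega, by omega⟩
      have hr := ih (t-1) ht' (by omega)
      refine ⟨t-1, hr, ht', ⟨ht0, ht1⟩, ?_⟩
      have := h1 (t-1)
      simpa using this
    · have ht' : InR (t+1) := ⟨by omega, by omega⟩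
      have hr := ih (t+1) ht' (by omega)
      refine ⟨t+1, hr, ht', ⟨ht0, ht1⟩, ?_⟩
      have := hm1 (t+1)
      simpa using this

-- multiplication predecessors are exact
lemma mulpreds_mem (M v u : Int) (hu : InR u) (hv : InR v) :
    u ∈ mulpredsB M v ↔ v = u * M := by
  unfold mulpredsB
  by_cases hM : M = 0
  · subst hM
    rw [if_pos rfl]
    by_cases hv0 : v = 0
    · subst hv0
      rw [if_pos rfl]
      simp [PySem.List.mem_pyRange_one]
      unfold InR at hu
      omega
    · rw [if_neg hv0]
      simp
      omega
  · rw [if_neg hM]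
    by_cases hmod : PySem.Int.mod v M = 0
    · rw [if_pos hmod]
      simp only [List.mem_singleton]
      constructor
      · intro h
        subst h
        have := PySem.Int.floordiv_mul_add_mod v M
        rw [hmod] at this
        omega
      · intro h
        subst h
        have h1 := PySem.Int.floordiv_mul_add_mod (u * M) M
        have hdvd : PySem.Int.mod (u * M) M = 0 :=
          (PySem.Int.mod_eq_zero_iff_dvd (u * M) M).mpr ⟨u, mul_comm u M⟩
        rw [hdvd] at h1
        have h2 : PySem.Int.floordiv (u * M) M * M = u * M := by omega
        exact (mul_right_cancel₀ hM h2).symm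
    · rw [if_neg hmod]
      simp
      intro h
      subst h
      exact hmod ((PySem.Int.mod_eq_zero_iff_dvd (u * M) M).mpr ⟨u, mul_comm u M⟩)

-- the predecessor list inverts the neighbour list exactly (in range)
lemma edge_flip (A B u v : Int) (hu : InR u) (hv : InR v) :
    v ∈ navA A B u ↔ u ∈ predsB A B v := by
  have hsplit : ∀ w : Int, w ∈ predsB A B v ↔
      (w ∈ ([v-1, v+1, v-A, v-B, v+A, v+B] : List Int) ∨
        w ∈ mulpredsB A v ∨ w ∈ mulpredsB B v) := by
    intro w
    simp [predsB, List.mem_append, or_assoc]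
  constructor
  · intro h
    rw [hsplit]
    simp only [navA, List.mem_cons, List.not_mem_nil, or_false] at h
    rcases h with h|h|h|h|h|h|h|h
    · exact Or.inl (by simp; omega)
    · exact Or.inl (by simp; omega)
    · exact Or.inl (by simp; omega)
    · exact Or.inl (by simp; omega)
    · exact Or.inl (by simp; omega)
    · exact Or.inl (by simp; omega)
    · exact Or.inr (Or.inl ((mulpreds_mem A v u hu hv).mpr h))
    · exact Or.inr (Or.inr ((mulpreds_mem B v u hu hv).mpr h))
  · intro h
    rw [hsplit] at h
    simp only [navA, List.mem_cons, List.not_mem_nil, or_false]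
    rcases h with h | h | h
    · simp only [List.mem_cons, List.not_mem_nil, or_false] at h
      rcases h with h|h|h|h|h|h
      · left; omega
      · right; left; omega
      · right; right; left; omega
      · right; right; right; left; omega
      · right; right; right; right; left; omega
      · right; right; right; right; right; left; omega
    · have := (mulpreds_mem A v u hu hv).mp h
      right; right; right; right; right; right; left; exact this
    · have := (mulpreds_mem B v u hu hv).mp h
      right; right; right; right; right; right; right; exact this

-- peel a walk at its start instead of its end
lemma reach_cons (nav : Int → List Int) (a : Int) :
    ∀ (k : Nat) (b : Int), ReachG nav a (k+1) b ↔
      ∃ w, (InR a ∧ InR w ∧ w ∈ nav a) ∧ ReachG nav w k b := by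
  intro k
  induction k with
  | zero =>
    intro b
    constructor
    · rintro ⟨w, hw, he⟩
      rw [show ReachG nav a 0 w = (w = a) from rfl] at hw
      subst hw
      exact ⟨b, he, rfl⟩
    · rintro ⟨w, he, hr⟩
      rw [show ReachG nav w 0 b = (b = w) from rfl] at hr
      subst hr
      exact ⟨a, rfl, he⟩
  | succ k ih =>
    intro b
    constructor
    · rintro ⟨y, hy, he⟩
      obtain ⟨w, hw, hr⟩ := (ih y).mp hy
      exact ⟨w, hw, y, hr, he⟩
    · rintro ⟨w, hw, y, hr, he⟩
      exact ⟨y, (ih y).mpr ⟨w, hw, hr⟩, he⟩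

-- a forward walk from s to x is a backward walk from x to s
lemma reach_rev (A B s : Int) : ∀ (k : Nat) (x : Int),
    ReachG (navA A B) s k x ↔ ReachG (predsB A B) x k s := by
  intro k
  induction k with
  | zero =>
    intro x
    rw [show ReachG (navA A B) s 0 x = (x = s) from rfl,
        show ReachG (predsB A B) x 0 s = (s = x) from rfl]
    exact eq_comm
  | succ k ih =>
    intro x
    constructor
    · rintro ⟨w, hr, hw, hx, hm⟩
      exact (reach_cons (predsB A B) x k s).mpr
        ⟨w, ⟨hx, hw, (edge_flip A B w x hw hx).mp hm⟩, (ih w).mp hr⟩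
    · intro h
      obtain ⟨w, ⟨hx, hw, hm⟩, hr⟩ := (reach_cons (predsB A B) x k s).mp h
      exact ⟨w, (ih w).mpr hr, hw, hx, (edge_flip A B w x hw hx).mpr hm⟩

-- invariants of the initial state (fresh visited array, singleton frontier)
lemma start_vis (a : Int) (ha : InR a) (x : Int) (hx : InR x) :
    Vis ((Array.replicate 100001 false).setIfInBounds a.toNat true) x ↔ x = a := by
  unfold Vis
  rw [getD_set]
  constructor
  · intro h
    split at h
    · rename_i hc
      unfold InR at ha hx
      omega
    · rw [getD_repl] at h; simp at h
  · intro h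
    rw [h]
    have hlt : a.toNat < (Array.replicate 100001 false).size := by
      simp; unfold InR at ha; omega
    rw [if_pos ⟨rfl, hlt⟩]

lemma dg_zero (nav : Int → List Int) (a x : Int) : DG nav a 0 x ↔ x = a := by
  constructor
  · rintro ⟨k, hk, h⟩
    have : k = 0 := by omega
    subst this
    exact h
  · intro h
    exact ⟨0, le_refl 0, h⟩

-- a frontier BFS from a with fuel 100001 started fresh returns the exact distance j of the target
lemma run_from_start (nav : Int → List Int) (a target : Int) (ha : InR a) (j : Nat)
    (hD : DG nav a j target) (hnD : ¬ DltG nav a j target) (hj : j < 100001) :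
    runB nav target 100001 [a]
      ((Array.replicate 100001 false).setIfInBounds a.toNat true) 0 = (j : Int) := by
  have hsize : ((Array.replicate 100001 false).setIfInBounds a.toNat true).size = 100001 := by
    simp
  have hVis0 : ∀ x, InR x →
      (Vis ((Array.replicate 100001 false).setIfInBounds a.toNat true) x ↔ DG nav a 0 x) := by
    intro x hx
    rw [start_vis a ha x hx, dg_zero]
  have hF0 : ∀ x, x ∈ [a] ↔ (DG nav a 0 x ∧ ¬ DltG nav a 0 x) := by
    intro x
    simp only [List.mem_singleton, dg_zero]
    constructor
    · intro h; exact ⟨h, by rintro ⟨k, hk, _⟩; omega⟩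
    · rintro ⟨h, _⟩; exact h
  have := runB_correct nav a target ha j 0 [a]
    ((Array.replicate 100001 false).setIfInBounds a.toNat true) 100001 0
    hsize hVis0 hF0 (by simpa using hD) (by simpa using hnD) hj
  simpa using this

-- ===== VERDICT (by name: the statement is the Claim_ definition above) =====
theorem bfs_spec : Claim_equal_bfs := by
  unfold Claim_equal_bfs
  intro A B source destination hDom hPre
  unfold Spec_bfs
  obtain ⟨hs0, hs1, hd0, hd1⟩ := hPre
  have hsR : InR source := ⟨hs0, hs1⟩
  have hdR : InR destination := ⟨hd0, hd1⟩
  -- the forward distance: minimal j with a forward walk source → destination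
  have hchainF : ReachG (navA A B) source ((destination - source).natAbs) destination :=
    reach_chain (navA A B) (fun v => by simp [navA]) (fun v => by simp [navA])
      source hsR ((destination - source).natAbs) destination hdR rfl
  obtain ⟨j, hPj, hjmin⟩ :=
    nat_exists_min (fun k => ReachG (navA A B) source k destination) _ hchainF
  have hjle : j ≤ (destination - source).natAbs := by
    by_contra h
    exact hjmin _ (by omega) hchainF
  have hjbound : j < 100001 := by
    unfold InR at hsR hdR; omega
  have hDf : DG (navA A B) source j destination := ⟨j, le_refl j, hPj⟩
  have hnDf : ¬ DltG (navA A B) source j destination := by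
    rintro ⟨k, hk, h⟩
    exact hjmin k hk h
  -- A's port equals the forward frontier BFS (simulation), which returns j
  have hA : bfs A B source destination =
      runB (navA A B) destination 100001 [source]
        ((Array.replicate 100001 false).setIfInBounds source.toNat true) 0 := by
    unfold bfs
    have hv : ((Array.replicate 100001 false).setIfInBounds source.toNat true).size = 100001 := by
      simp
    have hVs : Vis ((Array.replicate 100001 false).setIfInBounds source.toNat true) source := by
      unfold Vis
      rw [getD_set]
      have : source.toNat < (Array.replicate 100001 false).size := by simp; omega
      rw [if_pos ⟨rfl, this⟩]
    have hkey : ∀ x : Int, InR x →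
        Vis ((Array.replicate 100001 false).setIfInBounds source.toNat true) x → x = source := by
      intro x hx hvx
      exact (start_vis source hsR x hx).mp hvx
    have ha : ∀ x ∈ [source], InR x ∧
        Vis ((Array.replicate 100001 false).setIfInBounds source.toNat true) x := by
      intro x hx
      have : x = source := by simpa using hx
      subst this
      exact ⟨hsR, hVs⟩
    have hb : ∀ x, InR x →
        Vis ((Array.replicate 100001 false).setIfInBounds source.toNat true) x → x ∉ [source] →
        ((InR (x+1) → Vis ((Array.replicate 100001 false).setIfInBounds source.toNat true) (x+1)) ∧
         (InR (x-1) → Vis ((Array.replicate 100001 false).setIfInBounds source.toNat true) (x-1))) := by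
      intro x hxR hxV hxF
      have := hkey x hxR hxV
      subst this
      simp at hxF
    have hc : Vis ((Array.replicate 100001 false).setIfInBounds source.toNat true) destination →
        destination ∈ [source] := by
      intro h
      have := hkey destination hdR h
      simp [this]
    have hm : ∃ m, InR m ∧
        Vis ((Array.replicate 100001 false).setIfInBounds source.toNat true) m ∧
        (destination - m).natAbs ≤ (destination - source).natAbs :=
      ⟨source, hsR, hVs, Nat.le_refl _⟩
    have hfb : (destination - source).natAbs + 1 ≤ 100001 := by omega
    have hfa : (([source] : List Int).length + 2) * 9 ^ ((destination - source).natAbs + 1)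
        ≤ 3 * 9 ^ 100001 := by
      have h1 : (([source] : List Int).length + 2) = 3 := by simp
      rw [h1]
      exact Nat.mul_le_mul (Nat.le_refl 3) (Nat.pow_le_pow_right (by omega) (by omega))
    exact main A B destination hdR (destination - source).natAbs [source]
      ((Array.replicate 100001 false).setIfInBounds source.toNat true) 0
      (3 * 9 ^ 100001) 100001 hv ha hb hc hm hfb hfa
  have hAval : bfs A B source destination = (j : Int) := by
    rw [hA]
    exact run_from_start (navA A B) source destination hsR j hDf hnDf hjbound
  -- B's port is the backward frontier BFS; the reversed walks have the same minimum j
  have hDr : DG (predsB A B) destination j source := by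
    exact ⟨j, le_refl j, (reach_rev A B source j destination).mp hPj⟩
  have hnDr : ¬ DltG (predsB A B) destination j source := by
    rintro ⟨k, hk, h⟩
    exact hjmin k hk ((reach_rev A B source k destination).mpr h)
  have hBval : bfs_alt A B source destination = (j : Int) := by
    unfold bfs_alt
    exact run_from_start (predsB A B) destination source hdR j hDr hnDr hjbound
  rw [hAval, hBval]
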